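-- pv_equiv track=rewrite | github.com/anastasiianrnk/python_learning | strings/strings.py | charachters_ordering
-- ===== SOURCE A (Python) =====
-- def charachters_ordering(text):
--
--     if not type(text) is str:
--         raise TypeError("Only string are allowed")
--
--     lower_case = ''
--     upper_case = ''
--
--     for i in text:
--         if i.islower():
--             lower_case += i
--         else:
--             upper_case += i
--
--     return lower_case + upper_case
-- ===== SOURCE B (Python) =====
-- def charachters_ordering(text):
--
--     if not type(text) is str:
--         raise TypeError("Only string are allowed")
--
--     return ''.join(sorted(text, key=lambda c: not c.islower()))
-- ===== Notes on version B (the rewrite author's own statement) =====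
-- stated objective: simpler
-- what changed: Replaces the explicit two-string-accumulator partition loop with a single stable sort keyed on non-lowercase-ness, whose stability yields exactly the lowercase-first partition.
import Mathlib
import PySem

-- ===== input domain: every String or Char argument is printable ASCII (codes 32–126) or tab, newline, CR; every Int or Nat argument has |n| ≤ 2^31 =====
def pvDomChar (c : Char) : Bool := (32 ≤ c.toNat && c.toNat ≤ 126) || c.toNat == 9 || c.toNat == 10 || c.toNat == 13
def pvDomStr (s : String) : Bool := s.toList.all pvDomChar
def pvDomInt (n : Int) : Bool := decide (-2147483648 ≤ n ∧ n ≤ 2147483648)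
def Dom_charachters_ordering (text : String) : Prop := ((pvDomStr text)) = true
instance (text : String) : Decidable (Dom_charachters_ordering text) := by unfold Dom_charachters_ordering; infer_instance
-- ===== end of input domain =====

-- B replaces A's two-accumulator partition loop with one stable sort on the key "not islower" (simpler, not faster).

-- ===== PORT A =====
-- loop with two string accumulators lower_case/upper_case, kept as List Char; return lower_case + upper_case
def charachters_ordering (text : String) : String :=
  let r := text.toList.foldl
    (fun (acc : List Char × List Char) i =>
      if PySem.Str.islower i then (acc.1 ++ [i], acc.2) else (acc.1, acc.2 ++ [i]))
    ([], [])
  String.ofList (r.1 ++ r.2)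

-- ===== PORT B =====
-- ''.join(sorted(text, key=lambda c: not c.islower()))  — stable sort, Bool key (False < True)
def charachters_ordering_alt (text : String) : String :=
  String.ofList (PySem.List.sorted text.toList (fun c => !PySem.Str.islower c) false)

-- ===== PRECONDITION & SPEC =====
def Spec_charachters_ordering (text : String) (out : String) : Prop := out = charachters_ordering_alt text
instance (text : String) (out : String) : Decidable (Spec_charachters_ordering text out) := by unfold Spec_charachters_ordering; infer_instance

-- ===== CLAIM (what is proved, stated in full; the proofs are below) =====
def Claim_equal_charachters_ordering : Prop := ∀ (text : String), Dom_charachters_ordering text → Spec_charachters_ordering text (charachters_ordering text)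

-- ===== LEMMAS AND PROOFS =====

-- insertBy with a "false on L, true on U" split inserts exactly between L and U
theorem insertBy_split {α : Type} (before : α → α → Bool) (x : α) (L U : List α)
    (hL : ∀ y ∈ L, before x y = false) (hU : ∀ y ∈ U, before x y = true) :
    PySem.List.insertBy before x (L ++ U) = L ++ x :: U := by
  induction L with
  | nil =>
    cases U with
    | nil => rfl
    | cons u us =>
      simp [PySem.List.insertBy, hU u (by simp)]
  | cons l ls ih =>
    have h := hL l (by simp)
    simp [PySem.List.insertBy, h]
    exact ih (fun y hy => hL y (by simp [hy])) 

-- the stable insertion sort on a Bool key is the "false first, then true" partition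
theorem foldl_insertBy_partition (k : Char → Bool) (xs L U : List Char)
    (hL : ∀ y ∈ L, k y = false) (hU : ∀ y ∈ U, k y = true) :
    xs.foldl (fun acc x => PySem.List.insertBy (fun a b => decide (k a < k b)) x acc) (L ++ U)
      = (L ++ xs.filter (fun c => !k c)) ++ (U ++ xs.filter k) := by
  induction xs generalizing L U with
  | nil => simp
  | cons x rest ih =>
    by_cases hx : k x = true
    · have h1 : PySem.List.insertBy (fun a b => decide (k a < k b)) x (L ++ U)
          = (L ++ U) ++ [x] := by
        have hall : ∀ y ∈ L ++ U, decide (k x < k y) = false := by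
          intro y _; simp [hx, Bool.lt_iff]
        have h0 : PySem.List.insertBy (fun a b => decide (k a < k b)) x ((L ++ U) ++ [])
            = (L ++ U) ++ x :: [] :=
          insertBy_split (fun a b => decide (k a < k b)) x (L ++ U) [] hall
            (fun y hy => by simp at hy)
        simpa using h0
      have h2 : (L ++ U) ++ [x] = L ++ (U ++ [x]) := by simp
      simp only [List.foldl_cons, h1, h2]
      rw [ih L (U ++ [x]) hL (fun y hy => by
        rcases List.mem_append.mp hy with h | h
        · exact hU y h
        · simp at h; simp [h, hx])]
      simp [hx]
    · have hx' : k x = false := by simpa using hx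
      have h1 : PySem.List.insertBy (fun a b => decide (k a < k b)) x (L ++ U)
          = L ++ x :: U :=
        insertBy_split _ x L U
          (fun y hy => by simp [hx', hL y hy])
          (fun y hy => by simp [hx', hU y hy, Bool.lt_iff])
      have h2 : L ++ x :: U = (L ++ [x]) ++ U := by simp
      simp only [List.foldl_cons, h1, h2]
      rw [ih (L ++ [x]) U (fun y hy => by
        rcases List.mem_append.mp hy with h | h
        · exact hL y h
        · simp at h; simp [h, hx']) hU]
      simp [hx']

-- A's two-accumulator loop computes the two filters
theorem foldA_filter (xs : List Char) (lo up : List Char) :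
    xs.foldl
      (fun (acc : List Char × List Char) i =>
        if PySem.Str.islower i then (acc.1 ++ [i], acc.2) else (acc.1, acc.2 ++ [i]))
      (lo, up)
      = (lo ++ xs.filter (fun c => PySem.Str.islower c),
         up ++ xs.filter (fun c => !PySem.Str.islower c)) := by
  induction xs generalizing lo up with
  | nil => simp
  | cons x rest ih =>
    by_cases hx : PySem.Str.islower x
    · simp [List.foldl_cons, hx, ih]
    · simp [List.foldl_cons, hx, ih]

-- ===== VERDICT (by name: the statement is the Claim_ definition above) =====
theorem charachters_ordering_spec : Claim_equal_charachters_ordering := by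
  intro text _
  unfold Spec_charachters_ordering charachters_ordering charachters_ordering_alt
  rw [PySem.List.sorted_eq_foldl_insertBy]
  have h := foldl_insertBy_partition (fun c => !PySem.Str.islower c) text.toList [] []
    (by simp) (by simp)
  simp only [List.nil_append, List.append_nil] at h
  rw [h, foldA_filter]
  simp
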